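-- pv_equiv track=rewrite | github.com/201903022/PROYECTOF_LA- | PFLA/gramaticas.py | hayOtraRuta
-- ===== SOURCE A (Python) =====
-- def hayOtraRuta(historialT):
--         count = 1
--         if len(historialT) > 0:
--             for hT in reversed(historialT):
--                 if hT[6] == True:
--                     return True, count
--                 else:
--                     count += 1
--         return False, 0
-- ===== SOURCE B (Python) =====
-- def hayOtraRuta(historialT):
--     last_idx = None
--     for i, hT in enumerate(historialT):
--         if hT[6] == True:
--             last_idx = i
--     if last_idx is not None:
--         return True, len(historialT) - last_idx
--     return False, 0
-- ===== Notes on version B (the rewrite author's own statement) =====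
-- stated objective: alternative
-- what changed: Replaces A's backward scan over reversed(historialT) with early return by a single forward enumerate pass that keeps the index of the most recent flagged element, deriving the count as len - last_idx afterwards.
import Mathlib
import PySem

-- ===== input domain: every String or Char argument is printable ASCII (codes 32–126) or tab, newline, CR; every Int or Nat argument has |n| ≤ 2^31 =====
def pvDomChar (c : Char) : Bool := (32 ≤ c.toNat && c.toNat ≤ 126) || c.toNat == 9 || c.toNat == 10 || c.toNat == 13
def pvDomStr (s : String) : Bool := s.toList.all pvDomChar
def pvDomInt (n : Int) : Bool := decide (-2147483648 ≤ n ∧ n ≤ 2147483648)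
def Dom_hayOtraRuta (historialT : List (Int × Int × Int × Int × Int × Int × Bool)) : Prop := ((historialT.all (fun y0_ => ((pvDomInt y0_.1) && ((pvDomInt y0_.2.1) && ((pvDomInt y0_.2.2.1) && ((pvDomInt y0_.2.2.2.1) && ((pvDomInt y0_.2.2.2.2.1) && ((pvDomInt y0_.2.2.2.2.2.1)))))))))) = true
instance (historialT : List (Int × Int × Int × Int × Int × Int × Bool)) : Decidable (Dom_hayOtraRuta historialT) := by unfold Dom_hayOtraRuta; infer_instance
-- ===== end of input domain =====

-- B replaces A's backward early-return scan over reversed(historialT) by a single forward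
-- enumerate pass keeping the index of the most recent flagged element (objective: alternative).

-- ===== PORT A =====
-- the `for hT in reversed(historialT)` loop with its running `count`
def hayOtraRutaLoop (r : List (Int × Int × Int × Int × Int × Int × Bool)) (count : Int) : Bool × Int :=
  match r with
  | [] => (false, 0)                       -- loop finished: `return False, 0`
  | hT :: t =>
      if hT.2.2.2.2.2.2 == true then (true, count)
      else hayOtraRutaLoop t (count + 1)

def hayOtraRuta (historialT : List (Int × Int × Int × Int × Int × Int × Bool)) : Bool × Int :=
  if historialT.length > 0 then hayOtraRutaLoop historialT.reverse 1
  else (false, 0)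

-- ===== PORT B =====
-- the forward `for i, hT in enumerate(historialT)` pass keeping `last_idx`
def hayOtraRutaAltFold (historialT : List (Int × Int × Int × Int × Int × Int × Bool)) : Option Int :=
  (PySem.List.enumerate historialT 0).foldl
    (fun acc p => if p.2.2.2.2.2.2.2 == true then some p.1 else acc) none

def hayOtraRuta_alt (historialT : List (Int × Int × Int × Int × Int × Int × Bool)) : Bool × Int :=
  match hayOtraRutaAltFold historialT with
  | some i => (true, (historialT.length : Int) - i)
  | none => (false, 0)

-- ===== PRECONDITION & SPEC =====
def Spec_hayOtraRuta (historialT : List (Int × Int × Int × Int × Int × Int × Bool)) (out : Bool × Int) : Prop := out = hayOtraRuta_alt historialT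
instance (historialT : List (Int × Int × Int × Int × Int × Int × Bool)) (out : Bool × Int) : Decidable (Spec_hayOtraRuta historialT out) := by unfold Spec_hayOtraRuta; infer_instance

-- ===== CLAIM (what is proved, stated in full; the proofs are below) =====
def Claim_equal_hayOtraRuta : Prop := ∀ (historialT : List (Int × Int × Int × Int × Int × Int × Bool)), Dom_hayOtraRuta historialT → Spec_hayOtraRuta historialT (hayOtraRuta historialT)

-- ===== LEMMAS AND PROOFS =====

-- index (0-based, from the front) of the last element whose 7th component is true
def pvLastIdx : List (Int × Int × Int × Int × Int × Int × Bool) → Option Nat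
  | [] => none
  | x :: t =>
      match pvLastIdx t with
      | some i => some (i + 1)
      | none => if x.2.2.2.2.2.2 then some 0 else none

theorem pvLastIdx_lt {l : List (Int × Int × Int × Int × Int × Int × Bool)} {i : Nat}
    (h : pvLastIdx l = some i) : i < l.length := by
  induction l generalizing i with
  | nil => simp [pvLastIdx] at h
  | cons x t ih =>
      simp only [pvLastIdx] at h
      cases ht : pvLastIdx t with
      | some j =>
          rw [ht] at h
          have := ih ht
          simp only [Option.some.injEq] at h
          simp only [List.length_cons]
          omega
      | none =>
          rw [ht] at h
          split_ifs at h with hf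
          · simp only [Option.some.injEq] at h
            simp only [List.length_cons]
            omega

theorem pvLastIdx_append_single (xs : List (Int × Int × Int × Int × Int × Int × Bool))
    (x : Int × Int × Int × Int × Int × Int × Bool) :
    pvLastIdx (xs ++ [x]) = if x.2.2.2.2.2.2 then some xs.length else pvLastIdx xs := by
  induction xs with
  | nil => simp [pvLastIdx]
  | cons y t ih =>
      simp only [List.cons_append, pvLastIdx, ih]
      split_ifs with hf <;> rfl

theorem pvFold_enumerate (l : List (Int × Int × Int × Int × Int × Int × Bool))
    (acc : Option Int) (k : Int) :
    (PySem.List.enumerate l k).foldl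
      (fun acc p => if p.2.2.2.2.2.2.2 == true then some p.1 else acc) acc
    = match pvLastIdx l with
      | some i => some (k + (i : Int))
      | none => acc := by
  induction l generalizing acc k with
  | nil => simp [PySem.List.enumerate_nil, pvLastIdx]
  | cons x t ih =>
      rw [PySem.List.enumerate_cons]
      simp only [List.foldl_cons, pvLastIdx]
      rw [ih]
      cases ht : pvLastIdx t with
      | some i =>
          simp only []
          congr 1
          push_cast
          ring
      | none =>
          simp only []
          by_cases hf : x.2.2.2.2.2.2 = true
          · simp [hf]
          · simp [hf]

theorem pvLoopA (l : List (Int × Int × Int × Int × Int × Int × Bool)) (c : Int) :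
    hayOtraRutaLoop l.reverse c
    = match pvLastIdx l with
      | some i => (true, c + ((l.length : Int) - 1 - (i : Int)))
      | none => (false, 0) := by
  induction l using List.reverseRecOn generalizing c with
  | nil => simp [hayOtraRutaLoop, pvLastIdx]
  | append_singleton xs x ih =>
      rw [List.reverse_append]
      simp only [List.reverse_singleton, List.singleton_append, hayOtraRutaLoop,
        pvLastIdx_append_single]
      by_cases hf : x.2.2.2.2.2.2 = true
      · simp only [hf, beq_self_eq_true, if_true]
        simp only [List.length_append, List.length_singleton]
        congr 1
        push_cast
        ring
      · have hb : (x.2.2.2.2.2.2 == true) = false := by simp [hf]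
        rw [hb, if_neg hf]
        simp only [Bool.false_eq_true, if_false, ih (c + 1)]
        cases ht : pvLastIdx xs with
        | some i =>
            simp only [List.length_append, List.length_singleton]
            congr 1
            push_cast
            ring
        | none => rfl

-- ===== VERDICT (by name: the statement is the Claim_ definition above) =====
theorem hayOtraRuta_spec : Claim_equal_hayOtraRuta := by
  intro l _
  unfold Spec_hayOtraRuta hayOtraRuta hayOtraRuta_alt hayOtraRutaAltFold
  rw [pvFold_enumerate, pvLoopA]
  cases ht : pvLastIdx l with
  | some i =>
      have hlt : i < l.length := pvLastIdx_lt ht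
      have hpos : l.length > 0 := Nat.lt_of_le_of_lt (Nat.zero_le _) hlt
      simp only [hpos, if_true]
      congr 1
      omega
  | none =>
      split_ifs <;> rfl
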